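-- pv_equiv track=rewrite | github.com/jelleromer/adventofcode2024 | python/day9.py | compressFS2
-- ===== SOURCE A (Python) =====
-- def countGap(fs: list[int | None], left: int):
--     i = 0
--     length = len(fs)
--     while fs[left + i] is None:
--         i += 1
--         # avoid oob index
--         if left + i >= length:
--             return i
--     return i
--
-- def countFileSize(fs: list[int | None], r: int):
--     i = 0
--     filename = fs[r]
--     while fs[r - i] == filename:
--         i += 1
--     return i, filename
--
-- def getFittingGapIndex(fs, fileSize, r) -> int | None:
--     i = 0
--     gapSize = 0
--     while i < r:
--         while fs[i] is not None:
--             i += 1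
--             if i >= r:
--                 return None
--         gapSize = countGap(fs, i)
--         if gapSize >= fileSize:
--             return i
--         i += gapSize
--     return None
--
-- def compressFS2(fs: list[int | None]):
--     r = len(fs) - 1
--     while r > 1:
--         while fs[r] is None:
--             r -= 1
--         fileSize, fileName = countFileSize(fs, r)
--         r -= (fileSize - 1)
--         l = getFittingGapIndex(fs, fileSize, r)
--         if l is None:
--             r -= 1
--             continue
--         for i in range(fileSize):
--             fs[l + i] = fileName
--             fs[r + i] = None
--         r -= 1
--     return fs
-- ===== SOURCE B (Python) =====
-- def compressFS2(fs):
--     n = len(fs)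
--     # Build the ordered list of maximal gaps once; maintain it across moves, so the
--     # per-file cell-by-cell rescan of the disk (countGap/getFittingGapIndex) disappears.
--     gaps = []            # [start, size] of each maximal run of None, left to right
--     i = 0
--     while i < n:
--         if fs[i] is None:
--             j = i
--             while j < n and fs[j] is None:
--                 j += 1
--             gaps.append([i, j - i])
--             i = j
--         else:
--             i += 1
--     r = n - 1
--     while r > 1:
--         while fs[r] is None:
--             r -= 1
--         name = fs[r]
--         size = 0
--         while fs[r - size] == name:
--             size += 1
--         start = r - size + 1
--         l = None
--         for idx in range(len(gaps)):
--             g = gaps[idx]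
--             if g[0] >= start:
--                 break
--             if g[1] >= size:
--                 l = g[0]
--                 if g[1] == size:
--                     gaps.pop(idx)
--                 else:
--                     g[0] += size
--                     g[1] -= size
--                 break
--         if l is not None:
--             for t in range(size):
--                 fs[l + t] = name
--                 fs[start + t] = None
--         r = start - 1
--     return fs
-- ===== Notes on version B (the rewrite author's own statement) =====
-- stated objective: faster
-- what changed: B builds the ordered list of maximal gaps once and maintains it across moves (split/consume the leftmost fitting gap), so A's per-file cell-by-cell rescan of the disk (getFittingGapIndex/countGap) disappears; the right-to-left file scan itself is kept.
import Mathlib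
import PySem

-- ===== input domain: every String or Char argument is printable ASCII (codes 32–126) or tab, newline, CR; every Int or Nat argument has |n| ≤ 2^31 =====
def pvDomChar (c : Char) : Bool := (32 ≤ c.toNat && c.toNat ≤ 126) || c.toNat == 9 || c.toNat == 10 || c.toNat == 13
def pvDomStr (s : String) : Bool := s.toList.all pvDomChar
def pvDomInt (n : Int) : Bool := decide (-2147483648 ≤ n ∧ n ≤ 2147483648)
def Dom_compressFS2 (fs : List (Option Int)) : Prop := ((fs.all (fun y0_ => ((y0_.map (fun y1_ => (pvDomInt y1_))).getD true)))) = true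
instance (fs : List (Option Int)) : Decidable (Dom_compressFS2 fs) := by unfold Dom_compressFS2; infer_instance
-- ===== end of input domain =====

-- B keeps A's right-to-left whole-file scan but replaces A's per-file cell-by-cell
-- gap rescan by a gap list built once and maintained across moves (measured faster).
-- A mutates its argument in place and returns it; the equivalence proved here is
-- about the return value only (B performs the same in-place mutation in Python).

-- shared scan primitives: this code is identical in Source A (helper bodies) and Source B (inline loops)
-- `while fs[r] is None: r -= 1`
def pvSkipDown (fs : List (Option Int)) : Int → Nat → Int
  | r, 0 => r
  | r, fuel+1 => if PySem.List.pyGet? fs r = some none then pvSkipDown fs (r-1) fuel else r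

-- `while fs[r - i] == name: i += 1`
def pvMatchLen (fs : List (Option Int)) (r : Int) (name : Option Int) : Int → Nat → Int
  | i, 0 => i
  | i, fuel+1 => if PySem.List.pyGet? fs (r - i) = some name then pvMatchLen fs r name (i+1) fuel else i

-- `for t in range(size): fs[l + t] = name; fs[s + t] = None`
def pvMove : List (Option Int) → Int → Int → Option Int → Int → Nat → List (Option Int)
  | fs, _, _, _, _, 0 => fs
  | fs, l, s, name, t, m+1 =>
      pvMove (PySem.List.pySetD (PySem.List.pySetD fs (l+t) name) (s+t) none) l s name (t+1) m

-- ===== PORT A =====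
def countGapAux (fs : List (Option Int)) (left : Int) : Int → Nat → Int
  | i, 0 => i
  | i, fuel+1 =>
    if PySem.List.pyGet? fs (left + i) = some none then
      if left + (i+1) ≥ (fs.length : Int) then i+1 else countGapAux fs left (i+1) fuel
    else i

def countGapA (fs : List (Option Int)) (left : Int) : Int := countGapAux fs left 0 (fs.length + 2)

def countFileSizeA (fs : List (Option Int)) (r : Int) : Int × Option Int :=
  let filename := (PySem.List.pyGet? fs r).getD none
  (pvMatchLen fs r filename 0 (2 * fs.length + 2), filename)

-- inner `while fs[i] is not None: i += 1; if i >= r: return None`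
def skipNotNoneA (fs : List (Option Int)) (r : Int) : Int → Nat → Option Int
  | i, 0 => none
  | i, fuel+1 =>
    if ¬ (PySem.List.pyGet? fs i = some none) then
      (if i + 1 ≥ r then none else skipNotNoneA fs r (i+1) fuel)
    else some i

def getFitAux (fs : List (Option Int)) (fileSize r : Int) : Int → Nat → Option Int
  | i, 0 => none
  | i, fuel+1 =>
    if i < r then
      match skipNotNoneA fs r i (fs.length + 2) with
      | none => none
      | some i' =>
        let gapSize := countGapA fs i'
        if gapSize ≥ fileSize then some i' else getFitAux fs fileSize r (i' + gapSize) fuel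
    else none

def outerA : List (Option Int) → Int → Nat → List (Option Int)
  | fs, _, 0 => fs
  | fs, r, fuel+1 =>
    if r > 1 then
      let r1 := pvSkipDown fs r (2 * fs.length + 2)
      let fsz := countFileSizeA fs r1
      let r2 := r1 - (fsz.1 - 1)
      match getFitAux fs fsz.1 r2 0 (fs.length + 2) with
      | none => outerA fs (r2 - 1) fuel
      | some l => outerA (pvMove fs l r2 fsz.2 0 fsz.1.toNat) (r2 - 1) fuel
    else fs

def compressFS2 (fs : List (Option Int)) : List (Option Int) :=
  outerA fs ((fs.length : Int) - 1) (fs.length + 2)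

-- ===== PORT B =====
-- `while j < n and fs[j] is None: j += 1`
def pvScanNones (fs : List (Option Int)) : Int → Nat → Int
  | j, 0 => j
  | j, fuel+1 =>
    if j < (fs.length : Int) ∧ PySem.List.pyGet? fs j = some none then pvScanNones fs (j+1) fuel else j

def buildGapsAux (fs : List (Option Int)) : Int → Nat → List (Int × Int)
  | _, 0 => []
  | i, fuel+1 =>
    if i < (fs.length : Int) then
      if PySem.List.pyGet? fs i = some none then
        let j := pvScanNones fs i (fs.length + 2)
        (i, j - i) :: buildGapsAux fs j fuel
      else buildGapsAux fs (i+1) fuel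
    else []

-- `for idx in range(len(gaps)): … break` returning the found start and the updated gap list
def searchB : List (Int × Int) → Int → Int → Option Int × List (Int × Int)
  | [], _, _ => (none, [])
  | g :: t, size, start =>
    if g.1 ≥ start then (none, g :: t)
    else if g.2 ≥ size then
      (some g.1, if g.2 = size then t else (g.1 + size, g.2 - size) :: t)
    else
      let p := searchB t size start
      (p.1, g :: p.2)

def outerB : List (Option Int) → List (Int × Int) → Int → Nat → List (Option Int)
  | fs, _, _, 0 => fs
  | fs, gaps, r, fuel+1 =>
    if r > 1 then
      let r1 := pvSkipDown fs r (2 * fs.length + 2)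
      let name := (PySem.List.pyGet? fs r1).getD none
      let size := pvMatchLen fs r1 name 0 (2 * fs.length + 2)
      let start := r1 - size + 1
      let p := searchB gaps size start
      match p.1 with
      | none => outerB fs p.2 (start - 1) fuel
      | some l => outerB (pvMove fs l start name 0 size.toNat) p.2 (start - 1) fuel
    else fs

def compressFS2_alt (fs : List (Option Int)) : List (Option Int) :=
  outerB fs (buildGapsAux fs 0 (fs.length + 2)) ((fs.length : Int) - 1) (fs.length + 2)

-- ===== PRECONDITION & SPEC =====
-- Pre_ excludes exactly the inputs where Python A raises (IndexError): lists of length ≥ 3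
-- whose elements are all equal (all None, or all the same file id) — A's backward scans
-- then run off the left end through Python's negative-index wraparound.
def Pre_compressFS2 (fs : List (Option Int)) : Prop :=
  fs.length < 3 ∨ ¬ (∀ x ∈ fs, x = fs.getD 0 none)
instance (fs : List (Option Int)) : Decidable (Pre_compressFS2 fs) := by
  unfold Pre_compressFS2; infer_instance

def pvWitness_compressFS2 : List (Option Int) := [some 1, none, some 2]

def Spec_compressFS2 (fs : List (Option Int)) (out : List (Option Int)) : Prop := out = compressFS2_alt fs
instance (fs : List (Option Int)) (out : List (Option Int)) : Decidable (Spec_compressFS2 fs out) := by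
  unfold Spec_compressFS2; infer_instance

-- ===== CLAIM (what is proved, stated in full; the proofs are below) =====
def Claim_equal_compressFS2 : Prop :=
  ∀ (fs : List (Option Int)), Dom_compressFS2 fs → Pre_compressFS2 fs → Spec_compressFS2 fs (compressFS2 fs)

-- ===== LEMMAS AND PROOFS =====

-- `cellN fs t`: Python's `fs[t] is None` (reads with negative-index wraparound)
def cellN (fs : List (Option Int)) (t : Int) : Prop := PySem.List.pyGet? fs t = some none

-- `Runs fs F i l`: l lists the maximal runs of None of fs on the region [i, F), in order
inductive Runs (fs : List (Option Int)) (F : Int) : Int → List (Int × Int) → Prop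
  | nil (i : Int) (h : ∀ t, i ≤ t → t < F → ¬ cellN fs t) : Runs fs F i []
  | cons (i s k : Int) (rest : List (Int × Int))
      (his : i ≤ s) (hsF : s < F) (hk : 0 < k) (hkF : s + k ≤ F)
      (hpre : ∀ u, i ≤ u → u < s → ¬ cellN fs u)
      (hgap : ∀ u, s ≤ u → u < s + k → cellN fs u)
      (hcap : s + k = F ∨ ¬ cellN fs (s + k))
      (hrest : Runs fs F (s + k) rest) : Runs fs F i ((s, k) :: rest)

def INVg (fs : List (Option Int)) (F : Int) (gaps : List (Int × Int)) : Prop :=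
  ∃ bel bey, gaps = bel ++ bey ∧ Runs fs F 0 bel ∧ ∀ g ∈ bey, F ≤ g.1

lemma runs_start_ge {fs : List (Option Int)} {F : Int} :
    ∀ {i : Int} {l : List (Int × Int)}, Runs fs F i l → ∀ g ∈ l, i ≤ g.1 := by
  intro i l h
  induction h with
  | nil => simp
  | cons i s k rest his hsF hk hkF hpre hgap hcap hrest ih =>
    intro g hg
    rcases List.mem_cons.1 hg with h | h
    · subst h; exact his
    · have := ih g h; omega

lemma runs_entry_facts {fs : List (Option Int)} {F : Int} :
    ∀ {i : Int} {l : List (Int × Int)}, Runs fs F i l → ∀ g ∈ l, 0 < g.2 ∧ g.1 + g.2 ≤ F := by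
  intro i l h
  induction h with
  | nil => simp
  | cons i s k rest his hsF hk hkF hpre hgap hcap hrest ih =>
    intro g hg
    rcases List.mem_cons.1 hg with h | h
    · subst h; exact ⟨hk, hkF⟩
    · exact ih g h

lemma runs_extendl {fs : List (Option Int)} {F : Int} :
    ∀ {j : Int} {l : List (Int × Int)} (i : Int), Runs fs F j l → i ≤ j →
    (∀ u, i ≤ u → u < j → ¬ cellN fs u) → Runs fs F i l := by
  intro j l i h hij hno
  cases h with
  | nil j h =>
    refine Runs.nil i ?_
    intro t ht1 ht2
    by_cases hj : t < j
    · exact hno t ht1 hj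
    · exact h t (by omega) ht2
  | cons j s k rest his hsF hk hkF hpre hgap hcap hrest =>
    refine Runs.cons i s k rest (by omega) hsF hk hkF ?_ hgap hcap hrest
    intro u hu1 hu2
    by_cases hj : u < j
    · exact hno u hu1 hj
    · exact hpre u (by omega) hu2

lemma runs_transport {fs fs' : List (Option Int)} {F : Int} :
    ∀ {i : Int} {l : List (Int × Int)}, Runs fs F i l →
    (∀ u, i ≤ u → u < F → (cellN fs u ↔ cellN fs' u)) → Runs fs' F i l := by
  intro i l h
  induction h with
  | nil i h =>
    intro hc
    exact Runs.nil i (fun t ht1 ht2 hc' => h t ht1 ht2 ((hc t ht1 ht2).2 hc'))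
  | cons i s k rest his hsF hk hkF hpre hgap hcap hrest ih =>
    intro hc
    refine Runs.cons i s k rest his hsF hk hkF ?_ ?_ ?_ (ih ?_)
    · intro u h1 h2 hc'; exact hpre u h1 h2 ((hc u h1 (by omega)).2 hc')
    · intro u h1 h2; exact (hc u (by omega) (by omega)).1 (hgap u h1 h2)
    · rcases hcap with h | h
      · exact Or.inl h
      · rcases eq_or_lt_of_le hkF with he | hlt
        · exact Or.inl he
        · exact Or.inr (fun hc' => h ((hc (s+k) (by omega) hlt).2 hc'))
    · intro u h1 h2; exact hc u (by omega) h2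

lemma runs_weaken {fs : List (Option Int)} {F : Int} :
    ∀ {i : Int} {l : List (Int × Int)}, Runs fs F i l → ∀ F', F' ≤ F → ¬ cellN fs F' →
    ∃ b1 b2, l = b1 ++ b2 ∧ Runs fs F' i b1 ∧ ∀ g ∈ b2, F' ≤ g.1 := by
  intro i l h
  induction h with
  | nil i h =>
    intro F' hF hnc
    exact ⟨[], [], rfl, Runs.nil i (fun t h1 h2 => h t h1 (by omega)), by simp⟩
  | cons i s k rest his hsF hk hkF hpre hgap hcap hrest ih =>
    intro F' hF hnc
    by_cases hsk : s + k ≤ F'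
    · rcases ih F' hF hnc with ⟨b1, b2, rfl, hr1, hr2⟩
      refine ⟨(s,k) :: b1, b2, rfl, ?_, hr2⟩
      refine Runs.cons i s k b1 his (by omega) hk hsk hpre hgap ?_ hr1
      rcases eq_or_lt_of_le hsk with he | hlt
      · exact Or.inl he
      · rcases hcap with h | h
        · omega
        · exact Or.inr h
    · have hFs : F' ≤ s := by
        by_contra hc
        exact hnc (hgap F' (by omega) (by omega))
      refine ⟨[], (s,k) :: rest, rfl, Runs.nil i (fun t h1 h2 => hpre t h1 (by omega)), ?_⟩
      intro g hg
      rcases List.mem_cons.1 hg with h | h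
      · subst h; exact hFs
      · have := runs_start_ge hrest g h; omega

-- ——— scan-primitive characterisations ———

lemma sd_le (fs : List (Option Int)) : ∀ (fuel : Nat) (r : Int), pvSkipDown fs r fuel ≤ r := by
  intro fuel
  induction fuel with
  | zero => intro r; simp [pvSkipDown]
  | succ n ih =>
    intro r
    simp only [pvSkipDown]
    split
    · have := ih (r-1); omega
    · omega

lemma sd_post (fs : List (Option Int)) : ∀ (fuel : Nat) (r : Int),
    (r + (fs.length : Int) + 2).toNat ≤ fuel →
    ¬ (PySem.List.pyGet? fs (pvSkipDown fs r fuel) = some none) := by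
  intro fuel
  induction fuel with
  | zero =>
    intro r h
    simp only [pvSkipDown]
    intro hc
    rw [(PySem.List.pyGet?_eq_none_iff fs r).2 (by unfold PySem.Raise.InRange; omega)] at hc
    simp at hc
  | succ n ih =>
    intro r h
    simp only [pvSkipDown]
    split
    · exact ih (r-1) (by omega)
    · assumption

lemma ml_ge (fs : List (Option Int)) (r : Int) (name : Option Int) :
    ∀ (fuel : Nat) (i : Int), i ≤ pvMatchLen fs r name i fuel := by
  intro fuel
  induction fuel with
  | zero => intro i; simp [pvMatchLen]
  | succ n ih =>
    intro i
    simp only [pvMatchLen]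
    split
    · have := ih (i+1); omega
    · omega

lemma ml_lower (fs : List (Option Int)) (r : Int) (name : Option Int)
    (fuel : Nat) (hf : 1 ≤ fuel) (h : PySem.List.pyGet? fs r = some name) :
    1 ≤ pvMatchLen fs r name 0 fuel := by
  obtain ⟨m, rfl⟩ : ∃ m, fuel = m + 1 := ⟨fuel - 1, by omega⟩
  simp only [pvMatchLen]
  rw [if_pos (by simpa using h)]
  have := ml_ge fs r name m (0+1)
  omega

lemma ml_all (fs : List (Option Int)) (r : Int) (name : Option Int) :
    ∀ (fuel : Nat) (i j : Int), i ≤ j → j < pvMatchLen fs r name i fuel →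
      PySem.List.pyGet? fs (r - j) = some name := by
  intro fuel
  induction fuel with
  | zero => intro i j h1 h2; simp [pvMatchLen] at h2; omega
  | succ n ih =>
    intro i j h1 h2
    simp only [pvMatchLen] at h2
    split at h2
    · rcases eq_or_lt_of_le h1 with rfl | hlt
      · assumption
      · exact ih (i+1) j (by omega) h2
    · omega

lemma skipA_some (fs : List (Option Int)) (r : Int) :
    ∀ (fuel : Nat) (i s : Int), i ≤ s → s < r → (∀ u, i ≤ u → u < s → ¬ cellN fs u) →
      cellN fs s → (s - i).toNat < fuel → skipNotNoneA fs r i fuel = some s := by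
  intro fuel
  induction fuel with
  | zero => intro i s h1 h2 h3 h4 h5; omega
  | succ n ih =>
    intro i s h1 h2 h3 h4 h5
    simp only [skipNotNoneA]
    rcases eq_or_lt_of_le h1 with rfl | hlt
    · rw [if_neg (by simpa [cellN] using h4)]
    · rw [if_pos (by simpa [cellN] using h3 i le_rfl hlt), if_neg (by omega)]
      exact ih (i+1) s (by omega) h2 (fun u hu1 hu2 => h3 u (by omega) hu2) h4 (by omega)

lemma skipA_none (fs : List (Option Int)) (r : Int) :
    ∀ (fuel : Nat) (i : Int), i < r → (∀ u, i ≤ u → u < r → ¬ cellN fs u) →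
      (r - i).toNat ≤ fuel → skipNotNoneA fs r i fuel = none := by
  intro fuel
  induction fuel with
  | zero => intro i h1 h2 h3; omega
  | succ n ih =>
    intro i h1 h2 h3
    simp only [skipNotNoneA]
    rw [if_pos (by simpa [cellN] using h2 i le_rfl h1)]
    by_cases hi : i + 1 ≥ r
    · rw [if_pos hi]
    · rw [if_neg hi]
      exact ih (i+1) (by omega) (fun u hu1 hu2 => h2 u (by omega) hu2) (by omega)

lemma countGap_aux_eq (fs : List (Option Int)) (s k : Int)
    (hk : 0 < k) (hlen : s + k ≤ (fs.length : Int))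
    (hgap : ∀ u, s ≤ u → u < s + k → cellN fs u) (hcap : ¬ cellN fs (s + k)) :
    ∀ (fuel : Nat) (j : Int), 0 ≤ j → j ≤ k → (k - j).toNat < fuel →
      countGapAux fs s j fuel = k := by
  intro fuel
  induction fuel with
  | zero => intro j h1 h2 h3; omega
  | succ n ih =>
    intro j h1 h2 h3
    simp only [countGapAux]
    rcases eq_or_lt_of_le h2 with rfl | hlt
    · rw [if_neg (by simpa [cellN] using hcap)]
    · rw [if_pos (by simpa [cellN] using hgap (s+j) (by omega) (by omega))]
      by_cases hoob : s + (j+1) ≥ (fs.length : Int)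
      · rw [if_pos hoob]; omega
      · rw [if_neg hoob]
        exact ih (j+1) (by omega) (by omega) (by omega)

lemma countGap_eq (fs : List (Option Int)) (s k : Int)
    (hs : 0 ≤ s) (hk : 0 < k) (hlen : s + k ≤ (fs.length : Int))
    (hgap : ∀ u, s ≤ u → u < s + k → cellN fs u) (hcap : ¬ cellN fs (s + k)) :
    countGapA fs s = k :=
  countGap_aux_eq fs s k hk hlen hgap hcap (fs.length + 2) 0 le_rfl (by omega) (by omega)

-- ——— move: effect on cells ———

lemma length_pvMove : ∀ (m : Nat) (fs : List (Option Int)) (l s : Int) (name : Option Int) (t : Int),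
    (pvMove fs l s name t m).length = fs.length := by
  intro m
  induction m with
  | zero => intro fs l s name t; rfl
  | succ n ih =>
    intro fs l s name t
    simp only [pvMove]
    rw [ih]
    simp [PySem.List.length_pySetD]

lemma pyGet?_pySetD (fs : List (Option Int)) (j : Int) (v : Option Int)
    (hj : 0 ≤ j) (hjl : j < (fs.length : Int)) (u : Int) (hu : 0 ≤ u) :
    PySem.List.pyGet? (PySem.List.pySetD fs j v) u =
      if u = j then some v else PySem.List.pyGet? fs u := by
  rw [PySem.List.pySetD_of_nonneg fs v hj]
  rw [PySem.List.pyGet?_of_nonneg (fs.set j.toNat v) hu, PySem.List.pyGet?_of_nonneg fs hu]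
  rw [List.getElem?_set]
  by_cases h : u = j
  · rw [if_pos (show j.toNat = u.toNat by omega), if_pos (show j.toNat < fs.length by omega), if_pos h]
  · rw [if_neg (show ¬ j.toNat = u.toNat by omega), if_neg h]

lemma move_get : ∀ (m : Nat) (fs : List (Option Int)) (l s : Int) (name : Option Int) (t : Int),
    0 ≤ l → 0 ≤ t → l + t + m ≤ s → s + t + m ≤ (fs.length : Int) →
    ∀ u : Int, 0 ≤ u →
      PySem.List.pyGet? (pvMove fs l s name t m) u =
        if l + t ≤ u ∧ u < l + t + m then some name
        else if s + t ≤ u ∧ u < s + t + m then some none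
        else PySem.List.pyGet? fs u := by
  intro m
  induction m with
  | zero =>
    intro fs l s name t hl ht h1 h2 u hu
    simp only [pvMove]
    rw [if_neg (by push_cast; omega), if_neg (by push_cast; omega)]
  | succ n ih =>
    intro fs l s name t hl ht h1 h2 u hu
    have hlen1 : (PySem.List.pySetD fs (l+t) name).length = fs.length :=
      PySem.List.length_pySetD fs (l+t) name
    have hlen2 : ((PySem.List.pySetD (PySem.List.pySetD fs (l+t) name) (s+t) none)).length = fs.length := by
      rw [PySem.List.length_pySetD, hlen1]
    have h1' : l + t + (n : Int) + 1 ≤ s := by push_cast at h1 ⊢; omega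
    have h2' : s + t + (n : Int) + 1 ≤ (fs.length : Int) := by push_cast at h2 ⊢; omega
    simp only [pvMove]
    rw [ih _ l s name (t+1) hl (by omega) (by push_cast; omega)
        (by rw [hlen2]; push_cast; omega) u hu]
    by_cases c1 : l + (t+1) ≤ u ∧ u < l + (t+1) + (n : Int)
    · rw [if_pos c1, if_pos (by push_cast; omega)]
    · rw [if_neg c1]
      by_cases c2 : s + (t+1) ≤ u ∧ u < s + (t+1) + (n : Int)
      · rw [if_pos c2, if_neg (by push_cast; omega), if_pos (by push_cast; omega)]
      · rw [if_neg c2]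
        rw [pyGet?_pySetD _ (s+t) _ (by omega) (by rw [hlen1]; omega) u hu]
        rw [pyGet?_pySetD _ (l+t) _ (by omega) (by omega) u hu]
        by_cases e2 : u = s + t
        · rw [if_pos e2, if_neg (by push_cast; omega), if_pos (by push_cast; omega)]
        · rw [if_neg e2]
          by_cases e1 : u = l + t
          · rw [if_pos e1, if_pos (by push_cast; omega)]
          · rw [if_neg e1, if_neg (by push_cast; omega), if_neg (by push_cast; omega)]

-- ——— search equivalence ———

lemma searchB_none_of (L : List (Int × Int)) (size start : Int)
    (h : ∀ g ∈ L, start ≤ g.1) : searchB L size start = (none, L) := by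
  cases L with
  | nil => rfl
  | cons g t =>
    simp only [searchB]
    rw [if_pos (show g.1 ≥ start from h g (by simp))]

lemma search_spec (fs : List (Option Int)) (size start : Int)
    (hsl : start < (fs.length : Int)) (hnc : ¬ cellN fs start) :
    ∀ {i : Int} {bel : List (Int × Int)}, Runs fs start i bel → 0 ≤ i →
    ∀ bey, (∀ g ∈ bey, start ≤ g.1) →
    ∀ (fuelF : Nat), (start - i).toNat < fuelF →
    (getFitAux fs size start i fuelF = none ∧ searchB (bel ++ bey) size start = (none, bel ++ bey)) ∨
    (∃ pre s k post, bel = pre ++ (s,k) :: post ∧ size ≤ k ∧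
      getFitAux fs size start i fuelF = some s ∧
      searchB (bel ++ bey) size start =
        (some s, (pre ++ (if k = size then post else (s+size, k-size) :: post)) ++ bey)) := by
  intro i bel h
  induction h with
  | nil i h =>
    intro hi bey hbey fuelF hfuel
    left
    constructor
    · obtain ⟨f, rfl⟩ : ∃ f, fuelF = f + 1 := ⟨fuelF - 1, by omega⟩
      simp only [getFitAux]
      by_cases hir : i < start
      · rw [if_pos hir, skipA_none fs start (fs.length + 2) i hir h (by omega)]
      · rw [if_neg hir]
    · simpa using searchB_none_of bey size start hbey
  | cons i s k rest his hsF hk hkF hpre hgap hcap hrest ih =>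
    intro hi bey hbey fuelF hfuel
    obtain ⟨f, rfl⟩ : ∃ f, fuelF = f + 1 := ⟨fuelF - 1, by omega⟩
    have hcap' : ¬ cellN fs (s + k) := by
      rcases hcap with h | h
      · rw [h]; exact hnc
      · exact h
    have hgapA : countGapA fs s = k :=
      countGap_eq fs s k (by omega) hk (by omega) hgap hcap'
    have hskip : skipNotNoneA fs start i (fs.length + 2) = some s :=
      skipA_some fs start (fs.length + 2) i s his hsF hpre (hgap s le_rfl (by omega)) (by omega)
    by_cases hfit : k ≥ size
    · right
      refine ⟨[], s, k, rest, by simp, hfit, ?_, ?_⟩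
      · simp only [getFitAux]
        rw [if_pos (by omega), hskip]
        simp only [hgapA]
        rw [if_pos hfit]
      · simp only [List.cons_append, searchB]
        rw [if_neg (by omega), if_pos hfit]
        by_cases he : k = size
        · rw [if_pos he, if_pos he]; simp
        · rw [if_neg he, if_neg he]; simp
    · have step : getFitAux fs size start i (f+1) = getFitAux fs size start (s + k) f := by
        simp only [getFitAux]
        rw [if_pos (by omega), hskip]
        simp only [hgapA]
        rw [if_neg hfit]
      rcases ih (by omega) bey hbey f (by omega) with ⟨hA, hB⟩ | ⟨pre, s', k', post, hbel, hks, hA, hB⟩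
      · left
        refine ⟨by rw [step]; exact hA, ?_⟩
        simp only [List.cons_append, searchB]
        rw [if_neg (by omega), if_neg hfit, hB]
      · right
        refine ⟨(s,k) :: pre, s', k', post, by rw [hbel]; simp, hks, by rw [step]; exact hA, ?_⟩
        simp only [List.cons_append, searchB]
        rw [if_neg (by omega), if_neg hfit, hB]

-- ——— gap-list preservation across a move ———

lemma runs_update (fs fs' : List (Option Int)) (F size : Int) (hsz : 0 < size) :
    ∀ (pre : List (Int × Int)) (i s k : Int) (post : List (Int × Int)),
    Runs fs F i (pre ++ (s,k) :: post) → size ≤ k →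
    (∀ u, i ≤ u → u < F → (cellN fs' u ↔ (cellN fs u ∧ ¬ (s ≤ u ∧ u < s + size)))) →
    Runs fs' F i (pre ++ (if k = size then post else (s+size, k-size) :: post)) := by
  intro pre
  induction pre with
  | nil =>
    intro i s k post h hks hcell
    cases h with
    | cons _ _ _ _ his hsF hk hkF hpre hgap hcap hrest =>
      have htrans : Runs fs' F (s+k) post := by
        refine runs_transport hrest ?_
        intro u h1 h2
        rw [hcell u (by omega) h2]
        exact ⟨fun hc => ⟨hc, by omega⟩, fun hc => hc.1⟩
      simp only [List.nil_append]
      by_cases he : k = size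
      · rw [if_pos he]
        refine runs_extendl i htrans (by omega) ?_
        intro u h1 h2
        rw [hcell u h1 (by omega)]
        intro hc
        by_cases hu : u < s
        · exact hpre u h1 hu hc.1
        · exact hc.2 ⟨by omega, by omega⟩
      · rw [if_neg he]
        refine Runs.cons i (s+size) (k-size) post (by omega) (by omega) (by omega) (by omega) ?_ ?_ ?_ ?_
        · intro u h1 h2
          rw [hcell u h1 (by omega)]
          intro hc
          by_cases hu : u < s
          · exact hpre u h1 hu hc.1
          · exact hc.2 ⟨by omega, by omega⟩
        · intro u h1 h2
          rw [hcell u (by omega) (by omega)]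
          exact ⟨hgap u (by omega) (by omega), by omega⟩
        · have heq : s + size + (k - size) = s + k := by omega
          rw [heq]
          rcases hcap with hc | hc
          · exact Or.inl hc
          · by_cases hF : s + k = F
            · exact Or.inl hF
            · refine Or.inr ?_
              rw [hcell (s+k) (by omega) (by omega)]
              intro hcc
              exact hc hcc.1
        · have heq : s + size + (k - size) = s + k := by omega
          rw [heq]
          exact htrans
  | cons g0 pre' ih =>
    intro i s k post h hks hcell
    obtain ⟨s0, k0⟩ := g0
    rw [List.cons_append] at h
    cases h with
    | cons _ _ _ _ his hsF hk hkF hpre hgap hcap hrest =>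
      have hs0s : s0 + k0 ≤ s := by
        have := runs_start_ge hrest (s, k) (by simp)
        omega
      have hrest' := ih (s0+k0) s k post hrest hks
        (fun u h1 h2 => hcell u (by omega) h2)
      rw [List.cons_append]
      refine Runs.cons i s0 k0 _ his hsF hk hkF ?_ ?_ ?_ hrest'
      · intro u h1 h2
        rw [hcell u h1 (by omega)]
        intro hc
        exact hpre u h1 h2 hc.1
      · intro u h1 h2
        rw [hcell u (by omega) (by omega)]
        refine ⟨hgap u h1 h2, ?_⟩
        intro hin
        omega
      · rcases hcap with hc | hc
        · exact Or.inl hc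
        · by_cases hF : s0 + k0 = F
          · exact Or.inl hF
          · refine Or.inr ?_
            rw [hcell (s0+k0) (by omega) (by omega)]
            intro hcc
            exact hc hcc.1

-- ——— build: the initial gap list lists the None-runs of fs ———

lemma scan_char (fs : List (Option Int)) : ∀ (fuel : Nat) (j : Int), 0 ≤ j → j ≤ (fs.length : Int) →
    ((fs.length : Int) - j).toNat < fuel →
    j ≤ pvScanNones fs j fuel ∧ pvScanNones fs j fuel ≤ (fs.length : Int) ∧
    (∀ u, j ≤ u → u < pvScanNones fs j fuel → cellN fs u) ∧
    (pvScanNones fs j fuel = (fs.length : Int) ∨ ¬ cellN fs (pvScanNones fs j fuel)) := by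
  intro fuel
  induction fuel with
  | zero => intro j h1 h2 h3; omega
  | succ n ih =>
    intro j h1 h2 h3
    simp only [pvScanNones]
    by_cases hc : j < (fs.length : Int) ∧ PySem.List.pyGet? fs j = some none
    · rw [if_pos hc]
      rcases ih (j+1) (by omega) (by omega) (by omega) with ⟨ih1, ih2, ih3, ih4⟩
      refine ⟨by omega, ih2, ?_, ih4⟩
      intro u hu1 hu2
      rcases eq_or_lt_of_le hu1 with rfl | hlt
      · exact hc.2
      · exact ih3 u (by omega) hu2
    · rw [if_neg hc]
      refine ⟨le_rfl, h2, by intro u hu1 hu2; omega, ?_⟩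
      rcases eq_or_lt_of_le h2 with he | hlt
      · exact Or.inl he
      · exact Or.inr (fun hcc => hc ⟨hlt, hcc⟩)

lemma build_runs (fs : List (Option Int)) :
    ∀ (fuel : Nat) (i : Int), 0 ≤ i → ((fs.length : Int) - i).toNat < fuel →
      Runs fs (fs.length : Int) i (buildGapsAux fs i fuel) := by
  intro fuel
  induction fuel with
  | zero => intro i h1 h2; omega
  | succ n ih =>
    intro i h1 h2
    simp only [buildGapsAux]
    by_cases hil : i < (fs.length : Int)
    · rw [if_pos hil]
      by_cases hcn : PySem.List.pyGet? fs i = some none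
      · rw [if_pos hcn]
        rcases scan_char fs (fs.length + 2) i h1 (by omega) (by omega) with ⟨s1, s2, s3, s4⟩
        have hji : i < pvScanNones fs i (fs.length + 2) := by
          rcases eq_or_lt_of_le s1 with he | hlt
          · exfalso
            rcases s4 with h4 | h4
            · omega
            · rw [← he] at h4; exact h4 hcn
          · exact hlt
        have heq : i + (pvScanNones fs i (fs.length + 2) - i) = pvScanNones fs i (fs.length + 2) := by
          omega
        refine Runs.cons i i (pvScanNones fs i (fs.length + 2) - i) _ le_rfl hil (by omega) (by omega) ?_ ?_ ?_ ?_
        · intro u hu1 hu2; omega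
        · intro u hu1 hu2
          exact s3 u hu1 (by omega)
        · rw [heq]
          rcases s4 with h4 | h4
          · exact Or.inl h4
          · exact Or.inr h4
        · rw [heq]
          exact ih _ (by omega) (by omega)
      · rw [if_neg hcn]
        refine runs_extendl i (ih (i+1) (by omega) (by omega)) (by omega) ?_
        intro u hu1 hu2
        have : u = i := by omega
        rw [this]
        exact hcn
    · rw [if_neg hil]
      exact Runs.nil i (by intro t h1' h2'; omega)

-- ——— the outer loops agree ———

lemma outer_eq : ∀ (fuel : Nat) (fs : List (Option Int)) (gaps : List (Int × Int)) (r : Int),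
    (r ≤ 1 ∨ (r < (fs.length : Int) ∧ INVg fs (r+1) gaps)) →
    outerA fs r fuel = outerB fs gaps r fuel := by
  intro fuel
  induction fuel with
  | zero => intro fs gaps r _; rfl
  | succ f ih =>
    intro fs gaps r h
    by_cases hr : r > 1
    · rcases h with h | ⟨hrlen, hinv⟩
      · omega
      rcases hinv with ⟨bel, bey, rfl, hruns, hbey⟩
      simp only [outerA, outerB, countFileSizeA]
      rw [if_pos hr, if_pos hr]
      set r1 := pvSkipDown fs r (2 * fs.length + 2) with hr1
      set nm := (PySem.List.pyGet? fs r1).getD none with hnm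
      set sz := pvMatchLen fs r1 nm 0 (2 * fs.length + 2) with hsz
      have hR2 : r1 - (sz - 1) = r1 - sz + 1 := by omega
      rw [hR2]
      set st := r1 - sz + 1 with hst
      have hr1r : r1 ≤ r := sd_le fs _ r
      have hnn : ¬ (PySem.List.pyGet? fs r1 = some none) := sd_post fs _ r (by omega)
      by_cases hstpos : st ≤ 0
      · have hA : getFitAux fs sz st 0 (fs.length + 2) = none := by
          rw [show fs.length + 2 = (fs.length + 1) + 1 from rfl]
          simp only [getFitAux]
          rw [if_neg (by omega)]
        have hBs : searchB (bel ++ bey) sz st = (none, bel ++ bey) := by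
          apply searchB_none_of
          intro g hg
          rcases List.mem_append.1 hg with hg | hg
          · have := runs_start_ge hruns g hg; omega
          · have := hbey g hg; omega
        rw [hA, hBs]
        exact ih fs (bel ++ bey) (st - 1) (Or.inl (by omega))
      · replace hstpos : (0:Int) < st := by omega
        have hne : PySem.List.pyGet? fs r1 ≠ none := by
          intro hcon
          have hnm0 : nm = none := by rw [hnm, hcon]; rfl
          have hsz0 : sz = 0 := by
            rw [hsz]
            rw [show 2 * fs.length + 2 = (2 * fs.length + 1) + 1 from rfl]
            simp only [pvMatchLen]
            rw [if_neg (by rw [sub_zero, hcon, hnm0]; simp)]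
          have hin : PySem.Raise.InRange fs.length r1 := by
            unfold PySem.Raise.InRange
            constructor
            · omega
            · omega
          exact absurd hin ((PySem.List.pyGet?_eq_none_iff fs r1).1 hcon)
        obtain ⟨v, hv⟩ : ∃ v : Int, PySem.List.pyGet? fs r1 = some (some v) := by
          cases hw : PySem.List.pyGet? fs r1 with
          | none => exact absurd hw hne
          | some w =>
            cases w with
            | none => exact absurd hw hnn
            | some v => exact ⟨v, rfl⟩
        have hnmv : nm = some v := by rw [hnm, hv]; rfl
        have hsz1 : 1 ≤ sz := by
          have := ml_lower fs r1 nm (2 * fs.length + 2) (by omega) (by rw [hnmv]; exact hv)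
          omega
        have hstv : PySem.List.pyGet? fs st = some nm := by
          have hml := ml_all fs r1 nm (2 * fs.length + 2) 0 (sz - 1) (by omega) (by rw [← hsz]; omega)
          rw [show st = r1 - (sz - 1) from by omega]
          exact hml
        have hstnn : ¬ cellN fs st := by
          rw [cellN, hstv, hnmv]
          simp
        have hstlen : st < (fs.length : Int) := by
          by_contra hc
          have hnone : PySem.List.pyGet? fs st = none :=
            (PySem.List.pyGet?_eq_none_iff fs st).2 (by unfold PySem.Raise.InRange; omega)
          rw [hnone] at hstv
          simp at hstv
        obtain ⟨b1, b2, rfl, hb1, hb2⟩ := runs_weaken hruns st (by omega) hstnn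
        have hbey' : ∀ g ∈ b2 ++ bey, st ≤ g.1 := by
          intro g hg
          rcases List.mem_append.1 hg with hg | hg
          · exact hb2 g hg
          · have := hbey g hg; omega
        rw [show (b1 ++ b2) ++ bey = b1 ++ (b2 ++ bey) from by simp]
        rcases search_spec fs sz st hstlen hstnn hb1 le_rfl (b2 ++ bey) hbey' (fs.length + 2)
            (by omega) with ⟨hA, hB⟩ | ⟨pre, s, k, post, hbel, hks, hA, hB⟩
        · rw [hA, hB]
          apply ih
          by_cases hst1 : st - 1 ≤ 1
          · exact Or.inl hst1
          · refine Or.inr ⟨by omega, ?_⟩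
            rw [show st - 1 + 1 = st from by omega]
            exact ⟨b1, b2 ++ bey, rfl, hb1, hbey'⟩
        · rw [hA, hB]
          have hsfacts := runs_entry_facts hb1 (s, k) (by rw [hbel]; simp)
          have hs0 := runs_start_ge hb1 (s, k) (by rw [hbel]; simp)
          have hlen' : (pvMove fs s st nm 0 sz.toNat).length = fs.length := length_pvMove _ fs s st nm 0
          apply ih
          by_cases hst1 : st - 1 ≤ 1
          · exact Or.inl hst1
          · refine Or.inr ⟨by rw [hlen']; omega, ?_⟩
            rw [show st - 1 + 1 = st from by omega]
            refine ⟨pre ++ (if k = sz then post else (s + sz, k - sz) :: post), b2 ++ bey, by simp, ?_, hbey'⟩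
            have hcell : ∀ u, (0:Int) ≤ u → u < st →
                (cellN (pvMove fs s st nm 0 sz.toNat) u ↔ (cellN fs u ∧ ¬ (s ≤ u ∧ u < s + sz))) := by
              intro u hu0 hust
              have hmg := move_get sz.toNat fs s st nm 0 (by omega) le_rfl
                (by push_cast; omega) (by push_cast; omega) u hu0
              rw [cellN, hmg]
              by_cases hin : s + 0 ≤ u ∧ u < s + 0 + (sz.toNat : Int)
              · rw [if_pos hin, hnmv]
                constructor
                · intro hcc; exact absurd hcc (by simp)
                · intro hcc; exact absurd ⟨by omega, by omega⟩ hcc.2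
              · rw [if_neg hin, if_neg (by omega)]
                constructor
                · intro hcc; exact ⟨hcc, by omega⟩
                · intro hcc; exact hcc.1
            exact runs_update fs _ st sz (by omega) pre 0 s k post (by rw [← hbel]; exact hb1) hks hcell
    · rcases Nat.eq_or_lt_of_le (Nat.zero_le (f+1)) with _ | _
      all_goals simp only [outerA, outerB]; rw [if_neg hr, if_neg hr]

-- ===== VERDICT (by name: the statement is the Claim_ definition above) =====
theorem compressFS2_spec : Claim_equal_compressFS2 := by
  intro fs _ _
  unfold Spec_compressFS2 compressFS2 compressFS2_alt
  apply outer_eq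
  by_cases h : (fs.length : Int) - 1 ≤ 1
  · exact Or.inl h
  · refine Or.inr ⟨by omega, buildGapsAux fs 0 (fs.length + 2), [], by simp, ?_, by simp⟩
    have he : (fs.length : Int) - 1 + 1 = (fs.length : Int) := by omega
    rw [he]
    exact build_runs fs (fs.length + 2) 0 le_rfl (by omega)
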